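-- pv_equiv track=rewrite | github.com/sangho0407/Pre_coding_test | 2.Programmers/Lv0/세로 읽기.py | solution
-- ===== SOURCE A (Python) =====
-- def solution(my_string, m, c):
--     # result: 전체 문자열을 m 글자씩 나눈 2차원 리스트 (문자열을 여러 줄로 나눈 것)
--     # sublist: 현재 줄에 추가될 문자들을 임시로 저장하는 리스트
--     # ans: 최종 결과를 저장하는 리스트 (세로로 읽은 글자들)
--     result = []
--     sublist = []
--     ans = []
--
--     # 문자열의 모든 글자를 순회하면서
--     for i in my_string:
--         # 현재 글자를 sublist에 추가
--         sublist.append(i)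
--
--         # sublist의 길이가 m과 같아지면
--         if len(sublist) == m:
--             # sublist를 result에 추가하고 sublist를 초기화
--             result.append(sublist)
--             sublist = []
--
--     # 모든 줄에 대해서
--     for j in result:
--         # c번째 글자를 ans에 추가 (숫자는 0부터 시작하기 때문에 c-1)
--         ans.append(j[c-1])
--
--     # ans에 저장된 글자들을 연결하여 반환
--     return ''.join(ans)
-- ===== SOURCE B (Python) =====
-- def solution(my_string, m, c):
--     # Stride directly over the column: one char per complete m-length row,
--     # no 2D list is built. With no positive chunk size there are no rows.
--     if m <= 0:
--         return ''
--     n = len(my_string) // m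
--     return ''.join(my_string[i * m + c - 1] for i in range(n))
-- ===== Notes on version B (the rewrite author's own statement) =====
-- stated objective: simpler
-- what changed: B computes the column by direct index striding (one char per complete row at i*m+c-1, len//m rows, empty for m<=0) instead of building a 2D list of m-length chunks and then indexing each row; it allocates no intermediate lists.
-- outside the precondition, e.g. on solution('abcd', 2, 0): A returns 'bd', B returns 'db'
import Mathlib
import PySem

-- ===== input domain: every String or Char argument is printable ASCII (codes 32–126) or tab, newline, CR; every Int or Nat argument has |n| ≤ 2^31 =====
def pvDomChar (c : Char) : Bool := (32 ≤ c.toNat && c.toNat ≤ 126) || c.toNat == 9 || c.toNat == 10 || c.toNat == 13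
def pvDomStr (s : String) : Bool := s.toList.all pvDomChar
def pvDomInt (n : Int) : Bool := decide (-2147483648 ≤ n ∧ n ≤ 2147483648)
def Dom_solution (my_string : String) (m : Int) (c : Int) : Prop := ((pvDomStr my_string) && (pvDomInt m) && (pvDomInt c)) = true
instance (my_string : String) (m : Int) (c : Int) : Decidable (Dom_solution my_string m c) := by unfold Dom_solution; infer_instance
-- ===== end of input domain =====

-- B reads the column by direct index striding over the len//m complete rows (none for m ≤ 0)
-- instead of building A's 2D chunk list (objective: simpler).

-- ===== PORT A =====
-- loop body of A's first loop: append i to sublist, flush when it reaches length m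
def solutionStepA (m : Int) (st : List (List Char) × List Char) (i : Char) :
    List (List Char) × List Char :=
  let sublist := st.2 ++ [i]
  if (sublist.length : Int) = m then (st.1 ++ [sublist], []) else (st.1, sublist)

-- loop body of A's second loop: ans.append(j[c-1]) (none = IndexError, excluded by Pre_)
def solutionPickA (c : Int) (acc : List Char) (j : List Char) : List Char :=
  acc ++ (match PySem.List.pyGet? j (c - 1) with
          | some ch => [ch]
          | none => [])

def solution (my_string : String) (m : Int) (c : Int) : String :=
  let st := my_string.toList.foldl (solutionStepA m) ([], [])
  String.ofList (st.1.foldl (solutionPickA c) [])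

-- ===== PORT B =====
def solutionStepB (s : List Char) (m : Int) (c : Int) (acc : List Char) (i : Int) : List Char :=
  acc ++ (match PySem.List.pyGet? s (i * m + c - 1) with  -- my_string[i*m+c-1]
          | some ch => [ch]
          | none => [])

def solution_alt (my_string : String) (m : Int) (c : Int) : String :=
  if m ≤ 0 then ""                                        -- no positive chunk size: no rows
  else
    let n : Int := PySem.Int.floordiv (my_string.toList.length : Int) m  -- len(my_string) // m
    String.ofList ((PySem.List.pyRange 0 n 1).foldl (solutionStepB my_string.toList m c) [])

-- ===== PRECONDITION & SPEC =====
-- When at least one complete row exists (0 < m ≤ len), Pre_ excludes a column index c outside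
-- the problem's guaranteed range 1 ≤ c ≤ m: there A raises IndexError for c > m, and for c ≤ 0
-- A's value comes from Python's negative-index wraparound inside a row and B's from wraparound
-- in the whole string, neither specified.
def Pre_solution (my_string : String) (m : Int) (c : Int) : Prop :=
  (1 ≤ c ∧ c ≤ m) ∨ m ≤ 0 ∨ (my_string.toList.length : Int) < m
instance (my_string : String) (m : Int) (c : Int) : Decidable (Pre_solution my_string m c) := by
  unfold Pre_solution; infer_instance

def pvWitness_solution : String × Int × Int := ("ihrhbakrfpndopljhygc", 4, 2)

def Spec_solution (my_string : String) (m : Int) (c : Int) (out : String) : Prop := out = solution_alt my_string m c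
instance (my_string : String) (m : Int) (c : Int) (out : String) : Decidable (Spec_solution my_string m c out) := by unfold Spec_solution; infer_instance

-- ===== CLAIM (what is proved, stated in full; the proofs are below) =====
def Claim_equal_solution : Prop := ∀ (my_string : String) (m : Int) (c : Int), Dom_solution my_string m c → Pre_solution my_string m c → Spec_solution my_string m c (solution my_string m c)

-- ===== LEMMAS AND PROOFS =====

-- the list of complete m-chunks of l (the rows A keeps)
def pvChunks (m : Nat) (l : List Char) : List (List Char) :=
  if h : 0 < m ∧ m ≤ l.length then l.take m :: pvChunks m (l.drop m) else []
  termination_by l.length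
  decreasing_by simp only [List.length_drop]; omega

theorem pvChunks_short (m : Nat) (l : List Char) (h : l.length < m) : pvChunks m l = [] := by
  rw [pvChunks]; rw [dif_neg]; omega

theorem pvChunks_step (m : Nat) (hm : 0 < m) (l : List Char) (h : m ≤ l.length) :
    pvChunks m l = l.take m :: pvChunks m (l.drop m) := by
  rw [pvChunks]; rw [dif_pos ⟨hm, h⟩]

theorem pvChunks_len (m : Nat) (l : List Char) : ∀ j ∈ pvChunks m l, j.length = m := by
  induction hl : l.length using Nat.strong_induction_on generalizing l with
  | _ n ih =>
    subst hl
    by_cases h : 0 < m ∧ m ≤ l.length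
    · rw [pvChunks_step m h.1 l h.2]
      intro j hj
      rcases List.mem_cons.mp hj with hj | hj
      · simp [hj]; omega
      · exact ih (l.drop m).length (by simp; omega) (l.drop m) rfl j hj
    · rw [pvChunks]; rw [dif_neg h]; intro j hj; simp at hj

-- A's first loop computes exactly the complete chunks
theorem pvFoldA (m : Int) (hm : 1 ≤ m) (l : List Char) :
    ∀ (res : List (List Char)) (sub : List Char), (sub.length : Int) < m →
    (l.foldl (solutionStepA m) (res, sub)).1 = res ++ pvChunks m.toNat (sub ++ l) := by
  induction l with
  | nil =>
      intro res sub hsub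
      simp [pvChunks_short m.toNat sub (by omega)]
  | cons ch l ih =>
      intro res sub hsub
      rw [List.foldl_cons]
      by_cases hfull : ((sub ++ [ch]).length : Int) = m
      · rw [show solutionStepA m (res, sub) ch = (res ++ [sub ++ [ch]], []) by
          simp only [solutionStepA]; rw [if_pos hfull]]
        rw [ih (res ++ [sub ++ [ch]]) [] (by simp; omega)]
        have hlen : (sub ++ [ch]).length = m.toNat := by
          simp at hfull ⊢; omega
        have hsplit : sub ++ ch :: l = (sub ++ [ch]) ++ l := by simp
        rw [hsplit, pvChunks_step m.toNat (by omega) (sub ++ [ch] ++ l) (by simp at hlen ⊢; omega)]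
        rw [List.take_left' hlen, List.drop_left' hlen]
        simp
      · rw [show solutionStepA m (res, sub) ch = (res, sub ++ [ch]) by
          simp only [solutionStepA]; rw [if_neg hfull]]
        rw [ih res (sub ++ [ch]) (by simp at hfull ⊢; omega)]
        simp

-- picking index k < m from each complete chunk = striding over the original list
theorem pvChunks_pick (m : Nat) (hm : 0 < m) (k : Nat) (hk : k < m) :
    ∀ l : List Char,
      (pvChunks m l).map (fun j => j.getD k ' ') =
      (List.range (l.length / m)).map (fun i => l.getD (i * m + k) ' ') := by
  intro l
  induction hl : l.length using Nat.strong_induction_on generalizing l with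
  | _ n ih =>
    subst hl
    by_cases h : m ≤ l.length
    · rw [pvChunks_step m hm l h, Nat.div_eq_sub_div hm h]
      rw [List.range_succ_eq_map]
      simp only [List.map_cons, List.map_map]
      rw [ih (l.drop m).length (by simp; omega) (l.drop m) rfl]
      congr 1
      · rw [List.getD_eq_getElem?_getD, List.getD_eq_getElem?_getD]
        rw [List.getElem?_take_of_lt hk]
        simp
      · rw [List.length_drop]
        apply List.map_congr_left
        intro i hi
        simp only [Function.comp]
        rw [List.getD_eq_getElem?_getD, List.getD_eq_getElem?_getD, List.getElem?_drop]
        rw [show m + (i * m + k) = i.succ * m + k from by rw [Nat.succ_eq_add_one]; ring]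
    · rw [pvChunks_short m l (by omega), Nat.div_eq_of_lt (by omega)]
      simp

-- with a nonpositive m a sublist never reaches length m, so A flushes no row
theorem pvFoldA_nonpos (m : Int) (hm : m ≤ 0) (l : List Char) :
    ∀ (res : List (List Char)) (sub : List Char),
    (l.foldl (solutionStepA m) (res, sub)).1 = res := by
  induction l with
  | nil => intro res sub; rfl
  | cons ch l ih =>
      intro res sub
      rw [List.foldl_cons,
        show solutionStepA m (res, sub) ch = (res, sub ++ [ch]) by
          simp only [solutionStepA]
          rw [if_neg (by simp; omega)]]
      exact ih res (sub ++ [ch])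

-- the A-side pick fold over complete chunks is a map
theorem pvPickA_map (m : Nat) (hm : 0 < m) (c : Int) (hc1 : 1 ≤ c) (hcm : c ≤ (m : Int))
    (l : List Char) :
    (pvChunks m l).foldl (solutionPickA c) [] =
    (pvChunks m l).map (fun j => j.getD (c - 1).toNat ' ') := by
  rw [PySem.List.foldl_congr_mem _ _ (fun acc j => acc ++ [j.getD (c - 1).toNat ' ']) _
      (by
        intro acc j hj
        have hlen : j.length = m := pvChunks_len m l j hj
        unfold solutionPickA
        rw [PySem.List.pyGet?_eq_some_getElem j (i := c - 1) (by omega)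
              (by rw [hlen]; exact_mod_cast (by omega : c - 1 < (m : Int)))]
        simp only [List.append_cancel_left_eq]
        simp [List.getD_eq_getElem?_getD]
        rw [List.getElem?_eq_getElem (by omega)]; rfl)]
  rw [PySem.List.foldl_append_singleton_eq_map]
  simp

-- the B-side fold is the strided map
theorem pvFoldB (m c : Int) (hc1 : 1 ≤ c) (hcm : c ≤ m) (l : List Char) :
    (PySem.List.pyRange 0 (PySem.Int.floordiv (l.length : Int) m) 1).foldl
      (solutionStepB l m c) [] =
    (List.range (l.length / m.toNat)).map (fun i => l.getD (i * m.toNat + (c - 1).toNat) ' ') := by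
  have hm : 1 ≤ m := le_trans hc1 hcm
  have hmn : ((m.toNat : Nat) : Int) = m := Int.toNat_of_nonneg (by omega)
  rw [show PySem.Int.floordiv (l.length : Int) m
        = ((l.length / m.toNat : Nat) : Int) by
      rw [← hmn]; exact_mod_cast PySem.Int.floordiv_natCast l.length m.toNat]
  rw [PySem.List.pyRange_zero_natCast]
  rw [List.foldl_map]
  rw [PySem.List.foldl_congr_mem _ _
      (fun acc (i : Nat) => acc ++ [l.getD (i * m.toNat + (c - 1).toNat) ' ']) _
      (by
        intro acc i hi
        have hin : i < l.length / m.toNat := by simpa using hi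
        have hidx : (i : Int) * m + c - 1 = ((i * m.toNat + (c - 1).toNat : Nat) : Int) := by
          push_cast [Int.toNat_of_nonneg (show (0:Int) ≤ c - 1 by omega), hmn]
          ring
        unfold solutionStepB
        rw [hidx, PySem.List.pyGet?_natCast]
        have hlt : i * m.toNat + (c - 1).toNat < l.length := by
          have h1 : i * m.toNat + m.toNat ≤ (l.length / m.toNat) * m.toNat := by
            have : i + 1 ≤ l.length / m.toNat := hin
            calc i * m.toNat + m.toNat = (i + 1) * m.toNat := by ring
              _ ≤ (l.length / m.toNat) * m.toNat := Nat.mul_le_mul_right _ this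
          have h2 : (l.length / m.toNat) * m.toNat ≤ l.length := Nat.div_mul_le_self _ _
          omega
        rw [List.getElem?_eq_getElem hlt]
        simp [List.getD_eq_getElem?_getD]
        rw [List.getElem?_eq_getElem (by omega)]; rfl)]
  rw [PySem.List.foldl_append_singleton_eq_map]
  simp

-- ===== VERDICT (by name: the statement is the Claim_ definition above) =====
theorem solution_spec : Claim_equal_solution := by
  intro s m c _ hpre
  unfold Spec_solution solution solution_alt
  by_cases hm0 : m ≤ 0
  · -- m ≤ 0: no row is ever flushed and B returns "" directly
    rw [if_pos hm0]
    show String.ofList ((s.toList.foldl (solutionStepA m) ([], [])).1.foldl (solutionPickA c) []) = ""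
    rw [pvFoldA_nonpos m hm0 s.toList [] []]
    rfl
  · have hm : 1 ≤ m := by omega
    rw [if_neg hm0]
    show String.ofList ((s.toList.foldl (solutionStepA m) ([], [])).1.foldl (solutionPickA c) []) =
      String.ofList ((PySem.List.pyRange 0 (PySem.Int.floordiv (s.toList.length : Int) m) 1).foldl
        (solutionStepB s.toList m c) [])
    by_cases hcc : 1 ≤ c ∧ c ≤ m
    · obtain ⟨hc1, hcm⟩ := hcc
      rw [pvFoldA m hm s.toList [] [] (by simp; omega)]
      simp only [List.nil_append]
      rw [pvPickA_map m.toNat (by omega) c hc1 (by omega) s.toList]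
      rw [pvFoldB m c hc1 hcm s.toList]
      rw [pvChunks_pick m.toNat (by omega) (c - 1).toNat (by omega) s.toList]
    · -- 0 < m and len < m: no complete row on either side
      have hlen : (s.toList.length : Int) < m := by
        rcases hpre with h | h | h
        · exact absurd h hcc
        · omega
        · exact h
      rw [pvFoldA m hm s.toList [] [] (by simp; omega)]
      simp only [List.nil_append]
      rw [pvChunks_short m.toNat s.toList (by omega)]
      have hdiv : PySem.Int.floordiv (s.toList.length : Int) m
          = ((s.toList.length / m.toNat : Nat) : Int) := by
        rw [show m = ((m.toNat : Nat) : Int) from (Int.toNat_of_nonneg (by omega)).symm]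
        exact_mod_cast PySem.Int.floordiv_natCast s.toList.length m.toNat
      rw [hdiv, Nat.div_eq_of_lt (by omega)]
      rfl
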